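-- pv_equiv track=rewrite | github.com/aaronwppe/bp-pre-internship | python/56.py | check_num
-- ===== SOURCE A (Python) =====
-- def check_num(num):
--     n = abs(num)
--     rev = 0
--
--     while n > 0:
--         rev *= 10
--         rev += n % 10
--         n //= 10
--
--     if num < 0:
--         rev *= -1
--
--     return ((2 * rev) - 1) == num
-- ===== SOURCE B (Python) =====
-- def check_num(num):
--     rev = 0
--     for c in str(abs(num))[::-1]:
--         rev = rev * 10 + (ord(c) - 48)
--     if num < 0:
--         rev = -rev
--     return 2 * rev - 1 == num
-- ===== Notes on version B (the rewrite author's own statement) =====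
-- stated objective: alternative
-- what changed: B obtains the reversed digits from the decimal string rendering (iterating the reversed str(abs(num)) and accumulating each character's digit value) instead of A's arithmetic mod-ten/floor-division while loop, then applies the same final comparison of the doubled reversal minus one against num.
import Mathlib
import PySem

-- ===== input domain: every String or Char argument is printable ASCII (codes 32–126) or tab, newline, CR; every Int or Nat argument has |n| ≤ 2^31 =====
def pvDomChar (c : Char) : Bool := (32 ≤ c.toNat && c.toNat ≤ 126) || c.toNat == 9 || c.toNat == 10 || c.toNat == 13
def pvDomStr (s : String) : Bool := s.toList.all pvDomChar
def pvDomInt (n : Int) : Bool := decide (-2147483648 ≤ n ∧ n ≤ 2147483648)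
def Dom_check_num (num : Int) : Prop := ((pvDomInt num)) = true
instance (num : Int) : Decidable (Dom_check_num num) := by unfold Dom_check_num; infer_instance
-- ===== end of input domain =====

-- B reads the reversed digits off the decimal string rendering instead of A's mod-10/div-10
-- arithmetic loop; same final test, same cost (objective: alternative).

-- ===== PORT A =====
-- while n > 0: rev = rev*10 + n % 10; n //= 10
def revLoopA (n rev : Int) : Int :=
  if 0 < n then revLoopA (PySem.Int.floordiv n 10) (rev * 10 + PySem.Int.mod n 10) else rev
termination_by n.toNat
decreasing_by
  rename_i h
  rw [PySem.Int.floordiv_eq_ediv_of_pos (by omega : (0:Int) < 10)]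
  omega

def check_num (num : Int) : Bool :=
  let n := |num|
  let rev := revLoopA n 0
  let rev := if num < 0 then rev * (-1) else rev
  decide ((2 * rev) - 1 = num)

-- ===== PORT B =====
def check_num_alt (num : Int) : Bool :=
  let s := PySem.Int.toStr |num|
  -- for c in str(abs(num))[::-1]: rev = rev*10 + (ord(c) - 48)
  let rev := (((PySem.Str.slice? s none none (-1)).getD s).toList).foldl
      (fun acc c => acc * 10 + ((c.toNat : Int) - 48)) 0
  let rev := if num < 0 then -rev else rev
  decide (2 * rev - 1 = num)

-- ===== PRECONDITION & SPEC =====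
def Spec_check_num (num : Int) (out : Bool) : Prop := out = check_num_alt num
instance (num : Int) (out : Bool) : Decidable (Spec_check_num num out) := by unfold Spec_check_num; infer_instance

-- ===== CLAIM (what is proved, stated in full; the proofs are below) =====
def Claim_equal_check_num : Prop := ∀ (num : Int), Dom_check_num num → Spec_check_num num (check_num num)

-- ===== LEMMAS AND PROOFS =====

-- decimal digit characters of n, most significant first ([] for n = 0)
def dChars (n : Nat) : List Char :=
  if _h : n = 0 then [] else dChars (n / 10) ++ [Nat.digitChar (n % 10)]
decreasing_by exact Nat.div_lt_self (Nat.pos_of_ne_zero _h) (by omega)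

theorem toDigitsCore_acc (f : Nat) : ∀ (n : Nat) (l : List Char),
    Nat.toDigitsCore 10 f n l = Nat.toDigitsCore 10 f n [] ++ l := by
  induction f with
  | zero => intro n l; simp [Nat.toDigitsCore]
  | succ f ih =>
    intro n l
    simp only [Nat.toDigitsCore]
    by_cases h : n / 10 = 0
    · simp [h]
    · simp only [h, if_false]
      rw [ih (n / 10) (Nat.digitChar (n % 10) :: l), ih (n / 10) [Nat.digitChar (n % 10)]]
      simp

theorem toDigitsCore_eq_dChars : ∀ (f n : Nat), n < f →
    Nat.toDigitsCore 10 f n [] = if n = 0 then ['0'] else dChars n := by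
  intro f
  induction f with
  | zero => intro n h; omega
  | succ f ih =>
    intro n h
    simp only [Nat.toDigitsCore]
    by_cases h0 : n / 10 = 0
    · simp only [h0, if_true]
      by_cases hn : n = 0
      · subst hn; simp [Nat.digitChar]
      · rw [if_neg hn, dChars]
        simp [hn, h0, dChars]
    · simp only [h0, if_false]
      rw [toDigitsCore_acc, ih (n / 10) (by omega), if_neg h0]
      have hn : n ≠ 0 := by omega
      conv_rhs => rw [if_neg hn, dChars]
      simp [hn]

theorem digitChar_toNat (k : Nat) (hk : k < 10) : (Nat.digitChar k).toNat = 48 + k := by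
  interval_cases k <;> rfl

theorem foldl_dChars_rev (m : Nat) : ∀ (a : Int),
    (dChars m).reverse.foldl (fun acc c => acc * 10 + ((c.toNat : Int) - 48)) a
      = revLoopA (m : Int) a := by
  induction m using Nat.strong_induction_on with
  | _ m ih =>
    intro a
    by_cases hm : m = 0
    · subst hm
      rw [dChars, revLoopA]
      simp
    · rw [dChars, dif_neg hm, List.reverse_append, revLoopA,
        if_pos (by exact_mod_cast Nat.pos_of_ne_zero hm)]
      simp only [List.reverse_singleton, List.singleton_append, List.foldl_cons]
      rw [ih (m / 10) (Nat.div_lt_self (Nat.pos_of_ne_zero hm) (by omega))]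
      have h1 : PySem.Int.floordiv (m : Int) 10 = ((m / 10 : Nat) : Int) := by
        exact_mod_cast PySem.Int.floordiv_natCast m 10
      have h2 : PySem.Int.mod (m : Int) 10 = ((m % 10 : Nat) : Int) := by
        exact_mod_cast PySem.Int.mod_natCast m 10
      rw [h1, h2, digitChar_toNat (m % 10) (Nat.mod_lt m (by omega))]
      congr 1
      push_cast
      ring

theorem rev_eq (m : Nat) :
    (Nat.toDigits 10 m).reverse.foldl (fun acc c => acc * 10 + ((c.toNat : Int) - 48)) 0
      = revLoopA (m : Int) 0 := by
  rw [Nat.toDigits, toDigitsCore_eq_dChars (m + 1) m (by omega)]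
  by_cases hm : m = 0
  · subst hm
    rw [revLoopA]
    simp
  · rw [if_neg hm, foldl_dChars_rev]

-- ===== VERDICT (by name: the statement is the Claim_ definition above) =====
theorem check_num_spec : Claim_equal_check_num := by
  unfold Claim_equal_check_num Spec_check_num
  intro num _
  simp only [check_num, check_num_alt, PySem.Str.slice?_none_none_neg_one,
    Option.getD_some, String.toList_ofList, PySem.Int.toList_toStr]
  have habs : ¬ (|num| < 0) := not_lt.mpr (abs_nonneg num)
  have habs2 : |num| = (num.natAbs : Int) := Int.abs_eq_natAbs num
  rw [PySem.Int.toChars, if_neg habs, habs2]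
  simp only [Int.toNat_natCast]
  rw [rev_eq]
  rcases lt_or_ge num 0 with h | h
  · simp only [if_pos h, mul_neg_one]
  · simp only [if_neg (not_lt.mpr h)]
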